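-- pv_equiv track=rewrite | github.com/cookie0402/oa_leetcode | samara/cyclic.py | find_cyclic_shift
-- ===== SOURCE A (Python) =====
-- def find_cyclic_shift(arr):
--     n = len(arr)
--
--     # Check if the array is already sorted
--     if all(arr[i] <= arr[i + 1] for i in range(n - 1)):
--         return 0
--
--     index = -1
--     for i in range(n - 1):
--         if arr[i] > arr[i + 1]:
--             # If we find more than one such index, return -1
--             if index != -1:
--                 return -1
--             index = i
--
--     if index == -1:
--         return -1
--
--     # Calculate the shift needed
--     t = n - index - 1
--
--     # Perform the cyclic shift
--     arr = arr[-t:] + arr[:-t]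
--
--     # Check if the array is sorted
--     if all(arr[i] <= arr[i + 1] for i in range(n - 1)):
--         return t
--     else:
--         return -1
-- ===== SOURCE B (Python) =====
-- def find_cyclic_shift(arr):
--     n = len(arr)
--     descents = [i for i in range(n - 1) if arr[i] > arr[i + 1]]
--     if not descents:
--         return 0
--     if len(descents) > 1:
--         return -1
--     if arr[-1] <= arr[0]:
--         return n - descents[0] - 1
--     return -1
-- ===== Notes on version B (the rewrite author's own statement) =====
-- stated objective: simpler
-- what changed: B collects the descent positions in one pass and, for a single descent, decides sortedness of the rotation with one junction comparison of the last element against the first, dropping A's separate sorted pre-check, O(n) rotation reconstruction and full re-scan.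
import Mathlib
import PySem

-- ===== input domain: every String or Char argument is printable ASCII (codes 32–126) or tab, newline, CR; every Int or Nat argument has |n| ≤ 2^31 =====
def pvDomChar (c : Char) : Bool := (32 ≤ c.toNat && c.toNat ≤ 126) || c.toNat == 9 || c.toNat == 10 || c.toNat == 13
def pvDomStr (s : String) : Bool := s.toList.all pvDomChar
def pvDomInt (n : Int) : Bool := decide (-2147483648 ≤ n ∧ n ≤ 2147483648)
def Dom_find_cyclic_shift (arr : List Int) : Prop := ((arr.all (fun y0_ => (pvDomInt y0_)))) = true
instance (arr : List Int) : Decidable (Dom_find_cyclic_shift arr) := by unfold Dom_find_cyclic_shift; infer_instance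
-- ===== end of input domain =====

-- B replaces A's sorted pre-check, the O(n) rotation reconstruction and the full re-scan by one
-- descent-collecting pass plus a single junction comparison of the last element against the first (objective: simpler).

-- ===== PORT A =====
-- all(arr[i] <= arr[i + 1] for i in range(n - 1))
def pvAllSorted (arr : List Int) (n : Int) : Bool :=
  (PySem.List.pyRange 0 (n - 1) 1).all
    (fun i => decide (PySem.List.pyGetD arr i 0 ≤ PySem.List.pyGetD arr (i + 1) 0))

-- A's 'for i in range(n - 1)' loop over the remaining range; none = the early 'return -1'
def pvFindIndex (arr : List Int) : List Int → Int → Option Int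
  | [], index => some index
  | i :: rest, index =>
    if PySem.List.pyGetD arr i 0 > PySem.List.pyGetD arr (i + 1) 0 then
      if index ≠ -1 then none
      else pvFindIndex arr rest i
    else pvFindIndex arr rest index

def find_cyclic_shift (arr : List Int) : Int :=
  let n : Int := arr.length
  if pvAllSorted arr n then 0
  else
    match pvFindIndex arr (PySem.List.pyRange 0 (n - 1) 1) (-1) with
    | none => -1
    | some index =>
      if index = -1 then -1
      else
        let t := n - index - 1
        let arr2 := PySem.List.slice arr (some (-t)) none ++ PySem.List.slice arr none (some (-t))
        if pvAllSorted arr2 n then t else -1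

-- ===== PORT B =====
def find_cyclic_shift_alt (arr : List Int) : Int :=
  let n : Int := arr.length
  let descents := (PySem.List.pyRange 0 (n - 1) 1).filter
    (fun i => decide (PySem.List.pyGetD arr i 0 > PySem.List.pyGetD arr (i + 1) 0))
  if descents = [] then 0
  else if descents.length > 1 then -1
  else if PySem.List.pyGetD arr (-1) 0 ≤ PySem.List.pyGetD arr 0 0 then
    n - PySem.List.pyGetD descents 0 0 - 1
  else -1

-- ===== PRECONDITION & SPEC =====
def Spec_find_cyclic_shift (arr : List Int) (out : Int) : Prop := out = find_cyclic_shift_alt arr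
instance (arr : List Int) (out : Int) : Decidable (Spec_find_cyclic_shift arr out) := by unfold Spec_find_cyclic_shift; infer_instance

-- ===== CLAIM (what is proved, stated in full; the proofs are below) =====
def Claim_equal_find_cyclic_shift : Prop := ∀ (arr : List Int), Dom_find_cyclic_shift arr → Spec_find_cyclic_shift arr (find_cyclic_shift arr)

-- ===== LEMMAS AND PROOFS =====

-- the index-wise reading of A's sortedness check
lemma pvAllSorted_iff (xs : List Int) (n : Int) (hn : n = (xs.length : Int)) :
    pvAllSorted xs n = true ↔
      ∀ k : Nat, k + 1 < xs.length → xs.getD k 0 ≤ xs.getD (k + 1) 0 := by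
  subst hn
  unfold pvAllSorted
  rw [List.all_eq_true]
  constructor
  · intro h k hk
    have hm : (k : Int) ∈ PySem.List.pyRange 0 ((xs.length : Int) - 1) 1 := by
      rw [PySem.List.mem_pyRange_one]; omega
    have := h _ hm
    simp only [decide_eq_true_eq] at this
    have h1 : PySem.List.pyGetD xs (k : Int) 0 = xs.getD k 0 := PySem.List.pyGetD_natCast ..
    have h2 : PySem.List.pyGetD xs ((k : Int) + 1) 0 = xs.getD (k + 1) 0 := by
      rw [show ((k : Int) + 1) = ((k + 1 : Nat) : Int) by push_cast; ring]
      exact PySem.List.pyGetD_natCast ..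
    rw [h1, h2] at this; exact this
  · intro h i hi
    rw [PySem.List.mem_pyRange_one] at hi
    obtain ⟨h0, h1⟩ := hi
    have hk : i = ((i.toNat : Nat) : Int) := by omega
    simp only [decide_eq_true_eq]
    rw [hk, PySem.List.pyGetD_natCast,
      show ((i.toNat : Int) + 1) = ((i.toNat + 1 : Nat) : Int) by push_cast; ring,
      PySem.List.pyGetD_natCast]
    exact h _ (by omega)

-- A's loop, characterised by the list of descent positions
lemma pvFindIndex_char (arr : List Int) (l : List Int) (hpos : ∀ i ∈ l, 0 ≤ i) (idx : Int) :
    pvFindIndex arr l idx =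
      match l.filter (fun i => decide (PySem.List.pyGetD arr i 0 > PySem.List.pyGetD arr (i + 1) 0)) with
      | [] => some idx
      | [d] => if idx = -1 then some d else none
      | _ :: _ :: _ => none := by
  induction l generalizing idx with
  | nil => simp [pvFindIndex]
  | cons i rest ih =>
    have hi : (0:Int) ≤ i := hpos i (by simp)
    have hrest : ∀ j ∈ rest, (0:Int) ≤ j := fun j hj => hpos j (by simp [hj])
    by_cases hp : PySem.List.pyGetD arr i 0 > PySem.List.pyGetD arr (i + 1) 0
    · rw [show pvFindIndex arr (i :: rest) idx
          = if idx ≠ -1 then none else pvFindIndex arr rest i from by simp [pvFindIndex, hp]]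
      rw [List.filter_cons]
      simp only [hp, decide_true]
      by_cases hidx : idx = -1
      · subst hidx
        rw [if_neg (by omega), ih hrest i]
        rcases hf : rest.filter (fun j => decide (PySem.List.pyGetD arr j 0 > PySem.List.pyGetD arr (j + 1) 0)) with _ | ⟨d, ds⟩
        · simp
        · rcases ds with _ | ⟨e, es⟩ <;> simp [show i ≠ -1 by omega]
      · rw [if_pos hidx]
        rcases hf : rest.filter (fun j => decide (PySem.List.pyGetD arr j 0 > PySem.List.pyGetD arr (j + 1) 0)) with _ | ⟨d, ds⟩
        · simp [hidx]
        · rcases ds with _ | ⟨e, es⟩ <;> simp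
    · rw [show pvFindIndex arr (i :: rest) idx = pvFindIndex arr rest idx from by simp [pvFindIndex, hp]]
      rw [List.filter_cons]
      simp only [hp, decide_false]
      exact ih hrest idx

-- rotating at the unique descent: the rotated list is sorted iff last ≤ first
lemma rot_sorted_iff (arr : List Int) (d : Nat) (hd : d + 1 < arr.length)
    (honly : ∀ k : Nat, k + 1 < arr.length → k ≠ d → arr.getD k 0 ≤ arr.getD (k + 1) 0) :
    (∀ k : Nat, k + 1 < arr.length →
        (arr.drop (d + 1) ++ arr.take (d + 1)).getD k 0
          ≤ (arr.drop (d + 1) ++ arr.take (d + 1)).getD (k + 1) 0)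
      ↔ arr.getD (arr.length - 1) 0 ≤ arr.getD 0 0 := by
  set L := arr.length with hL
  have hm : (arr.drop (d + 1)).length = L - (d + 1) := by rw [List.length_drop]
  have htk : (arr.take (d + 1)).length = d + 1 := by rw [List.length_take]; omega
  set m := L - (d + 1) with hmdef
  have hm1 : 1 ≤ m := by omega
  have hget : ∀ j : Nat, j < L →
      (arr.drop (d + 1) ++ arr.take (d + 1)).getD j 0
        = if j < m then arr.getD (d + 1 + j) 0 else arr.getD (j - m) 0 := by
    intro j hj
    by_cases hjm : j < m
    · rw [if_pos hjm, List.getD_append _ _ _ _ (by omega)]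
      rw [List.getD_eq_getElem _ _ (by omega), List.getD_eq_getElem _ _ (by omega)]
      simp
    · rw [if_neg hjm, List.getD_append_right _ _ _ _ (by omega), hm]
      rw [List.getD_eq_getElem _ _ (by simp; omega), List.getD_eq_getElem _ _ (by omega)]
      simp [List.getElem_take]
  constructor
  · intro h
    have := h (m - 1) (by omega)
    rw [hget _ (by omega), hget _ (by omega)] at this
    rw [if_pos (by omega), if_neg (by omega)] at this
    rw [show d + 1 + (m - 1) = L - 1 by omega, show m - 1 + 1 - m = 0 by omega] at this
    exact this
  · intro hj k hk
    rw [hget _ (by omega), hget _ (by omega)]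
    by_cases h1 : k + 1 < m
    · rw [if_pos (by omega), if_pos h1, show d + 1 + (k + 1) = (d + 1 + k) + 1 by omega]
      exact honly _ (by omega) (by omega)
    · by_cases h2 : k < m
      · rw [if_pos h2, if_neg h1, show d + 1 + k = L - 1 by omega, show k + 1 - m = 0 by omega]
        exact hj
      · rw [if_neg h2, if_neg h1, show k + 1 - m = (k - m) + 1 by omega]
        exact honly _ (by omega) (by omega)

-- membership in the descent list, read on Nat indices
lemma mem_descents (arr : List Int) (i : Int) :
    i ∈ (PySem.List.pyRange 0 ((arr.length : Int) - 1) 1).filter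
        (fun i => decide (PySem.List.pyGetD arr i 0 > PySem.List.pyGetD arr (i + 1) 0))
      ↔ 0 ≤ i ∧ i < (arr.length : Int) - 1 ∧ arr.getD (i.toNat + 1) 0 < arr.getD i.toNat 0 := by
  rw [List.mem_filter, PySem.List.mem_pyRange_one, decide_eq_true_eq]
  constructor
  · rintro ⟨⟨h0, h1⟩, hp⟩
    refine ⟨h0, h1, ?_⟩
    rwa [show i = ((i.toNat : Nat) : Int) by omega, PySem.List.pyGetD_natCast,
      show ((i.toNat : Int) + 1) = ((i.toNat + 1 : Nat) : Int) by push_cast; ring,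
      PySem.List.pyGetD_natCast] at hp
  · rintro ⟨h0, h1, hp⟩
    refine ⟨⟨h0, h1⟩, ?_⟩
    rwa [show i = ((i.toNat : Nat) : Int) by omega, PySem.List.pyGetD_natCast,
      show ((i.toNat : Int) + 1) = ((i.toNat + 1 : Nat) : Int) by push_cast; ring,
      PySem.List.pyGetD_natCast]

-- A's sortedness check succeeds exactly when the descent list is empty
lemma allSorted_iff_nil (arr : List Int) :
    pvAllSorted arr (arr.length : Int) = true ↔
      (PySem.List.pyRange 0 ((arr.length : Int) - 1) 1).filter
        (fun i => decide (PySem.List.pyGetD arr i 0 > PySem.List.pyGetD arr (i + 1) 0)) = [] := by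
  rw [pvAllSorted_iff _ _ rfl, List.eq_nil_iff_forall_not_mem]
  constructor
  · intro h i hi
    rw [mem_descents] at hi
    obtain ⟨h0, h1, hp⟩ := hi
    have := h i.toNat (by omega)
    omega
  · intro h k hk
    by_contra hlt
    push Not at hlt
    exact h (k : Int) (by rw [mem_descents]; refine ⟨by omega, by omega, by simpa using hlt⟩)

-- the two programs agree on every input
lemma main_eq (arr : List Int) : find_cyclic_shift arr = find_cyclic_shift_alt arr := by
  simp only [find_cyclic_shift, find_cyclic_shift_alt]
  rcases hD : (PySem.List.pyRange 0 ((arr.length : Int) - 1) 1).filter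
      (fun i => decide (PySem.List.pyGetD arr i 0 > PySem.List.pyGetD arr (i + 1) 0)) with _ | ⟨d, ds⟩
  · -- no descents: already sorted
    rw [if_pos ((allSorted_iff_nil arr).mpr hD)]
    simp
  · -- at least one descent
    have hns : ¬ pvAllSorted arr (arr.length : Int) = true := by
      intro hs
      rw [allSorted_iff_nil arr, hD] at hs
      exact absurd hs (by simp)
    rw [if_neg (by simpa using hns)]
    have hchar := pvFindIndex_char arr (PySem.List.pyRange 0 ((arr.length : Int) - 1) 1)
      (fun i hi => ((PySem.List.mem_pyRange_one).1 hi).1) (-1)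
    rw [hD] at hchar
    have hdmem : d ∈ (PySem.List.pyRange 0 ((arr.length : Int) - 1) 1).filter
        (fun i => decide (PySem.List.pyGetD arr i 0 > PySem.List.pyGetD arr (i + 1) 0)) := by
      rw [hD]; simp
    rw [mem_descents] at hdmem
    obtain ⟨hd0, hd1, hdp⟩ := hdmem
    rcases ds with _ | ⟨e, es⟩
    · -- exactly one descent at d
      have hfi : pvFindIndex arr (PySem.List.pyRange 0 ((arr.length : Int) - 1) 1) (-1) = some d := by
        rw [hchar]; simp
      simp only [hfi]
      rw [if_neg (show ¬ d = -1 by omega)]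
      have hlen2 : 2 ≤ arr.length := by omega
      have htnat : (arr.length : Int) - d - 1 = ((arr.length - d.toNat - 1 : Nat) : Int) := by omega
      have htpos : 0 < arr.length - d.toNat - 1 := by omega
      have hslices :
          PySem.List.slice arr (some (-((arr.length : Int) - d - 1))) none
            ++ PySem.List.slice arr none (some (-((arr.length : Int) - d - 1)))
          = arr.drop (d.toNat + 1) ++ arr.take (d.toNat + 1) := by
        rw [htnat, PySem.List.slice_from_neg_natCast _ _ htpos,
          PySem.List.slice_to_neg_natCast _ _ htpos,
          show arr.length - (arr.length - d.toNat - 1) = d.toNat + 1 by omega]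
      rw [hslices]
      have hlenrot : ((arr.length : Int))
          = ((arr.drop (d.toNat + 1) ++ arr.take (d.toNat + 1)).length : Int) := by
        simp; omega
      have honly : ∀ k : Nat, k + 1 < arr.length → k ≠ d.toNat →
          arr.getD k 0 ≤ arr.getD (k + 1) 0 := by
        intro k hk hne
        by_contra hlt
        push Not at hlt
        have : (k : Int) ∈ (PySem.List.pyRange 0 ((arr.length : Int) - 1) 1).filter
            (fun i => decide (PySem.List.pyGetD arr i 0 > PySem.List.pyGetD arr (i + 1) 0)) := by
          rw [mem_descents]; refine ⟨by omega, by omega, by simpa using hlt⟩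
        rw [hD] at this
        simp at this
        omega
      have hsortiff : pvAllSorted (arr.drop (d.toNat + 1) ++ arr.take (d.toNat + 1)) (arr.length : Int) = true
          ↔ arr.getD (arr.length - 1) 0 ≤ arr.getD 0 0 := by
        rw [pvAllSorted_iff _ _ hlenrot]
        rw [show (arr.drop (d.toNat + 1) ++ arr.take (d.toNat + 1)).length = arr.length by simp; omega]
        exact rot_sorted_iff arr d.toNat (by omega) honly
      have e1 : PySem.List.pyGetD arr (-1) 0 = arr.getD (arr.length - 1) 0 := by
        rw [show ((-1 : Int)) = -((1 : Nat) : Int) by norm_num,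
          PySem.List.pyGetD_neg_natCast _ _ _ (by norm_num) (by omega)]
        exact (List.getD_eq_getElem _ _ (by omega)).symm
      have hjunc : (PySem.List.pyGetD arr (-1) 0 ≤ PySem.List.pyGetD arr 0 0)
          ↔ arr.getD (arr.length - 1) 0 ≤ arr.getD 0 0 := by
        rw [e1, PySem.List.pyGetD_zero]
      rw [if_neg (show ¬([d] : List Int) = [] by simp),
        if_neg (show ¬(([d] : List Int).length > 1) by simp),
        PySem.List.pyGetD_zero_cons]
      by_cases hj : arr.getD (arr.length - 1) 0 ≤ arr.getD 0 0
      · rw [if_pos (hsortiff.mpr hj), if_pos (hjunc.mpr hj)]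
      · rw [if_neg (fun hc => hj (hsortiff.mp hc)), if_neg (fun hc => hj (hjunc.mp hc))]
    · -- two or more descents
      have hfi : pvFindIndex arr (PySem.List.pyRange 0 ((arr.length : Int) - 1) 1) (-1) = none := by
        rw [hchar]
      simp only [hfi]
      rw [if_neg (show ¬(d :: e :: es : List Int) = [] by simp),
        if_pos (show (d :: e :: es : List Int).length > 1 by simp)]

-- ===== VERDICT (by name: the statement is the Claim_ definition above) =====
theorem find_cyclic_shift_spec : Claim_equal_find_cyclic_shift := by
  intro arr _
  exact main_eq arr
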